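-- pv_equiv track=rewrite | github.com/ZeroNot0/SLGMONITOR | scripts/build_final_join.py | aggregate_by_tier
-- ===== SOURCE A (Python) =====
-- REGIONS = ["亚洲T1", "欧美T1", "T2", "T3"]
--
-- def aggregate_by_tier(rows: list, country_to_tier: dict) -> dict:
--     """按 T 度汇总安装与流水。返回 {亚洲T1_安装, 欧美T1_安装, T2_安装, T3_安装, 亚洲T1_流水, ...}"""
--     sums = {f"{r}_安装": 0 for r in REGIONS}
--     for k in REGIONS:
--         sums[f"{k}_流水"] = 0
--     for row in rows:
--         country = (row.get("country") or "").strip().upper()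
--         tier = country_to_tier.get(country, "T3")
--         if tier not in REGIONS:
--             tier = "T3"
--         u = int(row.get("unified_units") or 0)
--         r = int(row.get("unified_revenue") or 0)
--         sums[f"{tier}_安装"] += u
--         sums[f"{tier}_流水"] += r
--     return sums
-- ===== SOURCE B (Python) =====
-- REGIONS = ["亚洲T1", "欧美T1", "T2", "T3"]
--
-- def aggregate_by_tier(rows: list, country_to_tier: dict) -> dict:
--     """Group rows into per-tier buckets first, then emit the flat sums in a second pass."""
--     buckets = {r: [] for r in REGIONS}
--     for row in rows:
--         country = (row.get("country") or "").strip().upper()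
--         tier = country_to_tier.get(country, "T3")
--         if tier not in REGIONS:
--             tier = "T3"
--         buckets[tier].append((int(row.get("unified_units") or 0),
--                               int(row.get("unified_revenue") or 0)))
--     out = {}
--     for r in REGIONS:
--         out[f"{r}_安装"] = sum(u for u, _ in buckets[r])
--     for r in REGIONS:
--         out[f"{r}_流水"] = sum(v for _, v in buckets[r])
--     return out
-- ===== Notes on version B (the rewrite author's own statement) =====
-- stated objective: alternative
-- what changed: B first groups each row's (units, revenue) pair into per-tier buckets seeded with all four REGIONS, then a separate second pass over REGIONS sums each bucket and emits the flat *_安装 / *_流水 keys, instead of A's single loop that increments a flat 8-key counter dict in place.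
import Mathlib
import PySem

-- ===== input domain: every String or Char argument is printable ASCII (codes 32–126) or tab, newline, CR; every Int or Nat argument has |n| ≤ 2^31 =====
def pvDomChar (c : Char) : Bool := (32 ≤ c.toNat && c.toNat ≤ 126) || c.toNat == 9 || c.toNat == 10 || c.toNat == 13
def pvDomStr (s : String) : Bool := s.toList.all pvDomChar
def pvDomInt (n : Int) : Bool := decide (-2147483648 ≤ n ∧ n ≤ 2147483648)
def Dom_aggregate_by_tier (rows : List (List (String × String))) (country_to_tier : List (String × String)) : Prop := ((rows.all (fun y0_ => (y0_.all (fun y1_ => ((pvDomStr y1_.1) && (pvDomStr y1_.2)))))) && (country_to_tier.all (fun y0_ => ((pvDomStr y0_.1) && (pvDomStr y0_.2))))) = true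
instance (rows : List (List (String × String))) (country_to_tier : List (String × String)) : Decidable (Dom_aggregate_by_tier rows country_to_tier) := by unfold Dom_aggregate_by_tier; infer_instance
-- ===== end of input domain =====

-- B groups rows into per-tier buckets first and emits the flat sums in a second pass (alternative decomposition, same cost); equivalence is about the return value only.

-- ===== PORT A =====
def pvREGIONS : List String := ["亚洲T1", "欧美T1", "T2", "T3"]

-- shared per-row helpers (identical lines in both Pythons):
-- (row.get("country") or "") collapses both a missing key and the falsy "" to "", which getD "" matches exactly
def pvTier (cd : PySem.Dict String String) (rd : PySem.Dict String String) : String :=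
  let country := PySem.Str.upper (PySem.Str.strip ((rd.get? "country").getD ""))
  let t := cd.getD country "T3"
  if t ∈ pvREGIONS then t else "T3"

-- int(v or 0): missing key or "" gives 0; otherwise int(s), total under Pre_ (ofStr? = none is exactly where Python raises ValueError)
def pvInt0 (v : Option String) : Int :=
  match v with
  | none => 0
  | some s => if s = "" then 0 else (PySem.Int.ofStr? s).getD 0

def pvAstep (cd : PySem.Dict String String) (d : PySem.Dict String Int) (row : List (String × String)) : PySem.Dict String Int :=
  let rd := PySem.Dict.ofList row
  let tier := pvTier cd rd
  let u := pvInt0 (rd.get? "unified_units")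
  let r := pvInt0 (rd.get? "unified_revenue")
  let d := d.modify (tier ++ "_安装") 0 (· + u)
  d.modify (tier ++ "_流水") 0 (· + r)

def aggregate_by_tier (rows : List (List (String × String))) (country_to_tier : List (String × String)) : List (String × Int) :=
  let cd := PySem.Dict.ofList country_to_tier
  let sums := pvREGIONS.foldl (fun d r => d.insert (r ++ "_安装") (0 : Int)) PySem.Dict.empty
  let sums := pvREGIONS.foldl (fun d k => d.insert (k ++ "_流水") (0 : Int)) sums
  let sums := rows.foldl (pvAstep cd) sums
  sums.items

-- ===== PORT B =====
def pvBstep (cd : PySem.Dict String String) (d : PySem.Dict String (List (Int × Int))) (row : List (String × String)) : PySem.Dict String (List (Int × Int)) :=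
  let rd := PySem.Dict.ofList row
  let tier := pvTier cd rd
  d.modify tier [] (· ++ [(pvInt0 (rd.get? "unified_units"), pvInt0 (rd.get? "unified_revenue"))])

def aggregate_by_tier_alt (rows : List (List (String × String))) (country_to_tier : List (String × String)) : List (String × Int) :=
  let cd := PySem.Dict.ofList country_to_tier
  let buckets := pvREGIONS.foldl (fun d r => d.insert r ([] : List (Int × Int))) PySem.Dict.empty
  let buckets := rows.foldl (pvBstep cd) buckets
  let out := pvREGIONS.foldl (fun d r => d.insert (r ++ "_安装") (((buckets.getD r []).map (·.1)).sum)) PySem.Dict.empty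
  let out := pvREGIONS.foldl (fun d r => d.insert (r ++ "_流水") (((buckets.getD r []).map (·.2)).sum)) out
  out.items

-- ===== PRECONDITION & SPEC =====
def pvIntOk (v : Option String) : Bool :=
  match v with
  | none => true
  | some s => s == "" || (PySem.Int.ofStr? s).isSome

-- Pre_ excludes exactly the rows on which Python's int() raises ValueError (a non-empty, non-int-parsable units/revenue string)
def Pre_aggregate_by_tier (rows : List (List (String × String))) (country_to_tier : List (String × String)) : Prop :=
  (rows.all (fun row => pvIntOk ((PySem.Dict.ofList row).get? "unified_units")
      && pvIntOk ((PySem.Dict.ofList row).get? "unified_revenue"))) = true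

instance (rows : List (List (String × String))) (country_to_tier : List (String × String)) : Decidable (Pre_aggregate_by_tier rows country_to_tier) := by unfold Pre_aggregate_by_tier; infer_instance

def pvWitness_aggregate_by_tier : (List (List (String × String))) × (List (String × String)) :=
  ([[("country", "us"), ("unified_units", "3"), ("unified_revenue", "10")],
    [("country", "de"), ("unified_units", " 7 "), ("unified_revenue", "")]],
   [("US", "T2"), ("DE", "T3")])

def Spec_aggregate_by_tier (rows : List (List (String × String))) (country_to_tier : List (String × String)) (out : List (String × Int)) : Prop := out = aggregate_by_tier_alt rows country_to_tier
instance (rows : List (List (String × String))) (country_to_tier : List (String × String)) (out : List (String × Int)) : Decidable (Spec_aggregate_by_tier rows country_to_tier out) := by unfold Spec_aggregate_by_tier; infer_instance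

-- ===== CLAIM (what is proved, stated in full; the proofs are below) =====
def Claim_equal_aggregate_by_tier : Prop := ∀ (rows : List (List (String × String))) (country_to_tier : List (String × String)), Dom_aggregate_by_tier rows country_to_tier → Pre_aggregate_by_tier rows country_to_tier → Spec_aggregate_by_tier rows country_to_tier (aggregate_by_tier rows country_to_tier)

-- ===== LEMMAS AND PROOFS =====

-- the common grouping both loops perform, as an explicit 4-way recursion
def pvGroup (cd : PySem.Dict String String) (rows : List (List (String × String)))
    (l1 l2 l3 l4 : List (Int × Int)) :
    List (Int × Int) × List (Int × Int) × List (Int × Int) × List (Int × Int) :=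
  match rows with
  | [] => (l1, l2, l3, l4)
  | row :: rest =>
    let rd := PySem.Dict.ofList row
    let t := pvTier cd rd
    let p := (pvInt0 (rd.get? "unified_units"), pvInt0 (rd.get? "unified_revenue"))
    if t = "亚洲T1" then pvGroup cd rest (l1 ++ [p]) l2 l3 l4
    else if t = "欧美T1" then pvGroup cd rest l1 (l2 ++ [p]) l3 l4
    else if t = "T2" then pvGroup cd rest l1 l2 (l3 ++ [p]) l4
    else pvGroup cd rest l1 l2 l3 (l4 ++ [p])

def pvSumsD (l1 l2 l3 l4 : List (Int × Int)) : PySem.Dict String Int :=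
  PySem.Dict.mk [("亚洲T1_安装", ((l1.map (·.1)).sum)), ("欧美T1_安装", ((l2.map (·.1)).sum)),
                 ("T2_安装", ((l3.map (·.1)).sum)), ("T3_安装", ((l4.map (·.1)).sum)),
                 ("亚洲T1_流水", ((l1.map (·.2)).sum)), ("欧美T1_流水", ((l2.map (·.2)).sum)),
                 ("T2_流水", ((l3.map (·.2)).sum)), ("T3_流水", ((l4.map (·.2)).sum))]

def pvBktD (l1 l2 l3 l4 : List (Int × Int)) : PySem.Dict String (List (Int × Int)) :=
  PySem.Dict.mk [("亚洲T1", l1), ("欧美T1", l2), ("T2", l3), ("T3", l4)]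


lemma pvTier_mem (cd rd : PySem.Dict String String) : pvTier cd rd ∈ pvREGIONS := by
  simp only [pvTier]
  split
  · assumption
  · simp [pvREGIONS]

lemma pvLoopA (cd : PySem.Dict String String) (rows : List (List (String × String)))
    (l1 l2 l3 l4 : List (Int × Int)) :
    rows.foldl (pvAstep cd) (pvSumsD l1 l2 l3 l4)
      = (fun g => pvSumsD g.1 g.2.1 g.2.2.1 g.2.2.2) (pvGroup cd rows l1 l2 l3 l4) := by
  induction rows generalizing l1 l2 l3 l4 with
  | nil => simp [pvGroup]
  | cons row rest ih =>
    have hmem := pvTier_mem cd (PySem.Dict.ofList row)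
    simp only [pvREGIONS, List.mem_cons, List.not_mem_nil, or_false] at hmem
    rw [List.foldl_cons]
    rcases hmem with h | h | h | h
    · rw [show pvAstep cd (pvSumsD l1 l2 l3 l4) row
          = pvSumsD (l1 ++ [(pvInt0 ((PySem.Dict.ofList row).get? "unified_units"),
              pvInt0 ((PySem.Dict.ofList row).get? "unified_revenue"))]) l2 l3 l4 by
        simp [pvAstep, h, pvSumsD, PySem.Dict.modify, PySem.Dict.getD,
          PySem.Dict.get?_mk_cons, PySem.Dict.insert, PySem.Dict.contains]]
      rw [ih, show pvGroup cd (row :: rest) l1 l2 l3 l4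
          = pvGroup cd rest (l1 ++ [(pvInt0 ((PySem.Dict.ofList row).get? "unified_units"),
              pvInt0 ((PySem.Dict.ofList row).get? "unified_revenue"))]) l2 l3 l4 by
        rw [pvGroup]; simp [h]]
    · rw [show pvAstep cd (pvSumsD l1 l2 l3 l4) row
          = pvSumsD l1 (l2 ++ [(pvInt0 ((PySem.Dict.ofList row).get? "unified_units"),
              pvInt0 ((PySem.Dict.ofList row).get? "unified_revenue"))]) l3 l4 by
        simp [pvAstep, h, pvSumsD, PySem.Dict.modify, PySem.Dict.getD,
          PySem.Dict.get?_mk_cons, PySem.Dict.insert, PySem.Dict.contains]]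
      rw [ih, show pvGroup cd (row :: rest) l1 l2 l3 l4
          = pvGroup cd rest l1 (l2 ++ [(pvInt0 ((PySem.Dict.ofList row).get? "unified_units"),
              pvInt0 ((PySem.Dict.ofList row).get? "unified_revenue"))]) l3 l4 by
        rw [pvGroup]; simp [h]]
    · rw [show pvAstep cd (pvSumsD l1 l2 l3 l4) row
          = pvSumsD l1 l2 (l3 ++ [(pvInt0 ((PySem.Dict.ofList row).get? "unified_units"),
              pvInt0 ((PySem.Dict.ofList row).get? "unified_revenue"))]) l4 by
        simp [pvAstep, h, pvSumsD, PySem.Dict.modify, PySem.Dict.getD,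
          PySem.Dict.get?_mk_cons, PySem.Dict.insert, PySem.Dict.contains]]
      rw [ih, show pvGroup cd (row :: rest) l1 l2 l3 l4
          = pvGroup cd rest l1 l2 (l3 ++ [(pvInt0 ((PySem.Dict.ofList row).get? "unified_units"),
              pvInt0 ((PySem.Dict.ofList row).get? "unified_revenue"))]) l4 by
        rw [pvGroup]; simp [h]]
    · rw [show pvAstep cd (pvSumsD l1 l2 l3 l4) row
          = pvSumsD l1 l2 l3 (l4 ++ [(pvInt0 ((PySem.Dict.ofList row).get? "unified_units"),
              pvInt0 ((PySem.Dict.ofList row).get? "unified_revenue"))]) by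
        simp [pvAstep, h, pvSumsD, PySem.Dict.modify, PySem.Dict.getD,
          PySem.Dict.get?_mk_cons, PySem.Dict.insert, PySem.Dict.contains]]
      rw [ih, show pvGroup cd (row :: rest) l1 l2 l3 l4
          = pvGroup cd rest l1 l2 l3 (l4 ++ [(pvInt0 ((PySem.Dict.ofList row).get? "unified_units"),
              pvInt0 ((PySem.Dict.ofList row).get? "unified_revenue"))]) by
        rw [pvGroup]; simp [h]]

lemma pvLoopB (cd : PySem.Dict String String) (rows : List (List (String × String)))
    (l1 l2 l3 l4 : List (Int × Int)) :
    rows.foldl (pvBstep cd) (pvBktD l1 l2 l3 l4)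
      = (fun g => pvBktD g.1 g.2.1 g.2.2.1 g.2.2.2) (pvGroup cd rows l1 l2 l3 l4) := by
  induction rows generalizing l1 l2 l3 l4 with
  | nil => simp [pvGroup]
  | cons row rest ih =>
    have hmem := pvTier_mem cd (PySem.Dict.ofList row)
    simp only [pvREGIONS, List.mem_cons, List.not_mem_nil, or_false] at hmem
    rw [List.foldl_cons]
    rcases hmem with h | h | h | h
    · rw [show pvBstep cd (pvBktD l1 l2 l3 l4) row
          = pvBktD (l1 ++ [(pvInt0 ((PySem.Dict.ofList row).get? "unified_units"),
              pvInt0 ((PySem.Dict.ofList row).get? "unified_revenue"))]) l2 l3 l4 by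
        simp [pvBstep, h, pvBktD, PySem.Dict.modify, PySem.Dict.getD,
          PySem.Dict.get?_mk_cons, PySem.Dict.insert, PySem.Dict.contains]]
      rw [ih, show pvGroup cd (row :: rest) l1 l2 l3 l4
          = pvGroup cd rest (l1 ++ [(pvInt0 ((PySem.Dict.ofList row).get? "unified_units"),
              pvInt0 ((PySem.Dict.ofList row).get? "unified_revenue"))]) l2 l3 l4 by
        rw [pvGroup]; simp [h]]
    · rw [show pvBstep cd (pvBktD l1 l2 l3 l4) row
          = pvBktD l1 (l2 ++ [(pvInt0 ((PySem.Dict.ofList row).get? "unified_units"),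
              pvInt0 ((PySem.Dict.ofList row).get? "unified_revenue"))]) l3 l4 by
        simp [pvBstep, h, pvBktD, PySem.Dict.modify, PySem.Dict.getD,
          PySem.Dict.get?_mk_cons, PySem.Dict.insert, PySem.Dict.contains]]
      rw [ih, show pvGroup cd (row :: rest) l1 l2 l3 l4
          = pvGroup cd rest l1 (l2 ++ [(pvInt0 ((PySem.Dict.ofList row).get? "unified_units"),
              pvInt0 ((PySem.Dict.ofList row).get? "unified_revenue"))]) l3 l4 by
        rw [pvGroup]; simp [h]]
    · rw [show pvBstep cd (pvBktD l1 l2 l3 l4) row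
          = pvBktD l1 l2 (l3 ++ [(pvInt0 ((PySem.Dict.ofList row).get? "unified_units"),
              pvInt0 ((PySem.Dict.ofList row).get? "unified_revenue"))]) l4 by
        simp [pvBstep, h, pvBktD, PySem.Dict.modify, PySem.Dict.getD,
          PySem.Dict.get?_mk_cons, PySem.Dict.insert, PySem.Dict.contains]]
      rw [ih, show pvGroup cd (row :: rest) l1 l2 l3 l4
          = pvGroup cd rest l1 l2 (l3 ++ [(pvInt0 ((PySem.Dict.ofList row).get? "unified_units"),
              pvInt0 ((PySem.Dict.ofList row).get? "unified_revenue"))]) l4 by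
        rw [pvGroup]; simp [h]]
    · rw [show pvBstep cd (pvBktD l1 l2 l3 l4) row
          = pvBktD l1 l2 l3 (l4 ++ [(pvInt0 ((PySem.Dict.ofList row).get? "unified_units"),
              pvInt0 ((PySem.Dict.ofList row).get? "unified_revenue"))]) by
        simp [pvBstep, h, pvBktD, PySem.Dict.modify, PySem.Dict.getD,
          PySem.Dict.get?_mk_cons, PySem.Dict.insert, PySem.Dict.contains]]
      rw [ih, show pvGroup cd (row :: rest) l1 l2 l3 l4
          = pvGroup cd rest l1 l2 l3 (l4 ++ [(pvInt0 ((PySem.Dict.ofList row).get? "unified_units"),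
              pvInt0 ((PySem.Dict.ofList row).get? "unified_revenue"))]) by
        rw [pvGroup]; simp [h]]

-- ===== VERDICT (by name: the statement is the Claim_ definition above) =====
theorem aggregate_by_tier_spec : Claim_equal_aggregate_by_tier := by
  intro rows ctt _ _
  simp only [Spec_aggregate_by_tier, aggregate_by_tier, aggregate_by_tier_alt]
  rw [show (pvREGIONS.foldl (fun d k => d.insert (k ++ "_流水") (0 : Int))
        (pvREGIONS.foldl (fun d r => d.insert (r ++ "_安装") (0 : Int)) PySem.Dict.empty))
      = pvSumsD [] [] [] [] from rfl,
    show (pvREGIONS.foldl (fun d r => d.insert r ([] : List (Int × Int))) PySem.Dict.empty)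
      = pvBktD [] [] [] [] from rfl,
    pvLoopA, pvLoopB]
  rcases pvGroup (PySem.Dict.ofList ctt) rows [] [] [] [] with ⟨g1, g2, g3, g4⟩
  simp [pvSumsD, pvBktD, pvREGIONS, PySem.Dict.insert, PySem.Dict.contains,
    PySem.Dict.getD, PySem.Dict.get?_mk_cons, PySem.Dict.empty, PySem.Dict.items,
    PySem.Dict.get?]
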